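-- pv_equiv track=rewrite | github.com/qfzxhy/EventExtraction_system | event_extraction/trans_bio_data.py | trans_bio
-- ===== SOURCE A (Python) =====
-- def trans_bio(data):
--     words = data[0].split()
--     label_types = ['TRIG','TERM']
--     trigger1 = data[1].replace('_',' ').replace(' ','')
--     trigger2 = data[2].replace('_', ' ').replace(' ','')
--     source = data[3].replace('_',' ').replace(' ','')
--     target1 = data[4].replace('_',' ').replace(' ','')
--     target2 = data[5].replace('_', ' ').replace(' ','')
--     elems = [trigger1,trigger2,source,target1,target2]
--     bios = [[word,'O'] for word in words]
--
--     for elem_id,elem in enumerate(elems):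
--         kk = 1
--         if elem_id < 2:
--             kk = 0
--         for i in range(len(words)):
--             for j in range(i+1,len(words)+1):
--                 if ''.join(words[i:j]) == elem:
--                     for k in range(i,j):
--                         if k == i :
--                             bios[k][1] = 'B-'+label_types[kk]
--                         else:
--                             bios[k][1] = 'I-'+label_types[kk]
--                 if ''.join(words[i:j]) not in elem:
--                     break
--
--
--     return bios
-- ===== SOURCE B (Python) =====
-- def trans_bio(data):
--     words = data[0].split()
--     elems = [data[k].replace('_', ' ').replace(' ', '') for k in range(1, 6)]
--     bios = [[w, 'O'] for w in words]
--     n = len(words)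
--     for elem_id, elem in enumerate(elems):
--         if not elem:
--             continue
--         tag = 'TRIG' if elem_id < 2 else 'TERM'
--         need = len(elem)
--         for i in range(n):
--             # words are non-empty, so at most one end index j gives a span of
--             # total length len(elem): walk to it and compare once
--             total = 0
--             j = i
--             while j < n and total < need:
--                 total += len(words[j])
--                 j += 1
--             if total == need and ''.join(words[i:j]) == elem:
--                 bios[i][1] = 'B-' + tag
--                 for k in range(i + 1, j):
--                     bios[k][1] = 'I-' + tag
--     return bios
-- ===== Notes on version B (the rewrite author's own statement) =====
-- stated objective: alternative
-- what changed: Instead of trying every span end j and pruning with a substring-membership break, B uses that whitespace-split words are non-empty, so per start i there is exactly one candidate end whose span has the entity's total length: it walks to that end by accumulating word lengths and does a single string comparison (no substring scans); empty entity strings are skipped up front.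
import Mathlib
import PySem

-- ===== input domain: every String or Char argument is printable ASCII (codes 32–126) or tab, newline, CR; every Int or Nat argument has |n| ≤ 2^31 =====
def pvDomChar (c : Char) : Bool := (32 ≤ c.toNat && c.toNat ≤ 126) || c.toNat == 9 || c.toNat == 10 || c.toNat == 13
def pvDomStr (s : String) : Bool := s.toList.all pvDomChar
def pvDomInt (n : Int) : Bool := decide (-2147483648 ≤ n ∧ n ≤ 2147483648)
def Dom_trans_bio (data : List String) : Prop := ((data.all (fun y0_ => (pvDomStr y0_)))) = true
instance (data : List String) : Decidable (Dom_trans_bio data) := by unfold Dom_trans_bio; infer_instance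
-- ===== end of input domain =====

-- B walks, per start index, to the single end index whose span has the entity's total
-- length (words are non-empty) and compares once, instead of A's scan of all ends with
-- a substring-membership break; same return value on every input A accepts.

-- ===== PORT A =====
-- shared by both Pythons: s.replace('_',' ').replace(' ','') (exact via PySem.Chars.replace)
def pvClean (s : String) : List Char :=
  PySem.Chars.replace (PySem.Chars.replace s.toList ['_'] [' ']) [' '] []

-- for k in range(i,j): bios[k][1] = 'B-'+lt if k==i else 'I-'+lt  (bios entries as (word, tag) pairs)
def pvMarkA (bios : List (List Char × String)) (i j : Nat) (lt : String) :
    List (List Char × String) :=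
  (List.range' i (j - i)).foldl
    (fun b k => b.modify k (fun p => (p.1, if k = i then "B-" ++ lt else "I-" ++ lt))) bios

-- A's inner j-loop: for j in range(i+1, len(words)+1) with the `not in elem: break`
-- (''.join(words[i:j]) ported as PySem.Chars.join [] of the slice; 0 ≤ i < j so the
--  slice words[i:j] is (words.drop i).take (j-i), exact)
def pvLoopJA (words : List (List Char)) (elem : List Char) (lt : String) (i : Nat) :
    Nat → List (List Char × String) → List (List Char × String)
  | j, bios =>
    if _h : j ≤ words.length then
      let s := PySem.Chars.join [] ((words.drop i).take (j - i))
      let bios' := if s = elem then pvMarkA bios i j lt else bios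
      if PySem.Chars.isIn s elem then pvLoopJA words elem lt i (j + 1) bios' else bios'
    else bios
  termination_by j _ => words.length + 1 - j

-- A's i-loop: for i in range(len(words))
def pvLoopIA (words : List (List Char)) (elem : List Char) (lt : String) :
    Nat → List (List Char × String) → List (List Char × String)
  | i, bios =>
    if _h : i < words.length then
      pvLoopIA words elem lt (i + 1) (pvLoopJA words elem lt i (i + 1) bios)
    else bios
  termination_by i _ => words.length - i

def trans_bio (data : List String) : List (List String) :=
  let words := PySem.Chars.split₀ (PySem.List.pyGetD data 0 "").toList
  let label_types := ["TRIG", "TERM"]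
  let elems := [pvClean (PySem.List.pyGetD data 1 ""), pvClean (PySem.List.pyGetD data 2 ""),
                pvClean (PySem.List.pyGetD data 3 ""), pvClean (PySem.List.pyGetD data 4 ""),
                pvClean (PySem.List.pyGetD data 5 "")]
  let bios := words.map (fun w => (w, "O"))
  let res := (PySem.List.enumerate elems).foldl
    (fun b (p : Int × List Char) =>
      let kk : Nat := if p.1 < 2 then 0 else 1
      pvLoopIA words p.2 (label_types.getD kk "") 0 b) bios
  res.map (fun p => [String.mk p.1, p.2])

-- ===== PORT B =====
-- bios[k][1] = tag
def pvSetTag (bios : List (List Char × String)) (k : Nat) (tag : String) :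
    List (List Char × String) :=
  bios.modify k (fun p => (p.1, tag))

-- B's while loop: j, total walk while j < n and total < need
def pvWalk (words : List (List Char)) (need : Nat) :
    Nat → Nat → Nat × Nat
  | j, total =>
    if _h : j < words.length ∧ total < need then
      pvWalk words need (j + 1) (total + (words.getD j []).length)
    else (j, total)
  termination_by j _ => words.length - j

-- B's body for one start index i
def pvStepB (words : List (List Char)) (elem : List Char) (tag : String)
    (bios : List (List Char × String)) (i : Nat) : List (List Char × String) :=
  let need := elem.length
  let jt := pvWalk words need i 0
  if jt.2 = need ∧ PySem.Chars.join [] ((words.drop i).take (jt.1 - i)) = elem then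
    (List.range' (i + 1) (jt.1 - (i + 1))).foldl
      (fun b k => pvSetTag b k ("I-" ++ tag)) (pvSetTag bios i ("B-" ++ tag))
  else bios

def trans_bio_alt (data : List String) : List (List String) :=
  let words := PySem.Chars.split₀ (PySem.List.pyGetD data 0 "").toList
  let elems := [pvClean (PySem.List.pyGetD data 1 ""), pvClean (PySem.List.pyGetD data 2 ""),
                pvClean (PySem.List.pyGetD data 3 ""), pvClean (PySem.List.pyGetD data 4 ""),
                pvClean (PySem.List.pyGetD data 5 "")]
  let bios := words.map (fun w => (w, "O"))
  let res := (PySem.List.enumerate elems).foldl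
    (fun b (p : Int × List Char) =>
      if p.2 = [] then b
      else
        let tag := if p.1 < 2 then "TRIG" else "TERM"
        (List.range words.length).foldl (pvStepB words p.2 tag) b) bios
  res.map (fun p => [String.mk p.1, p.2])

-- ===== PRECONDITION & SPEC =====
-- A reads data[1]..data[5]; it raises IndexError iff len(data) < 6 — exactly those inputs are excluded.
def Pre_trans_bio (data : List String) : Prop := 6 ≤ data.length
instance (data : List String) : Decidable (Pre_trans_bio data) := by unfold Pre_trans_bio; infer_instance

def pvWitness_trans_bio : List String := ["the cat sat", "cat", "sat_on", "", "the cat", "x"]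

def Spec_trans_bio (data : List String) (out : List (List String)) : Prop := out = trans_bio_alt data
instance (data : List String) (out : List (List String)) : Decidable (Spec_trans_bio data out) := by unfold Spec_trans_bio; infer_instance

-- ===== CLAIM (what is proved, stated in full; the proofs are below) =====
def Claim_equal_trans_bio : Prop := ∀ (data : List String), Dom_trans_bio data → Pre_trans_bio data → Spec_trans_bio data (trans_bio data)

-- ===== LEMMAS AND PROOFS =====

-- the concatenation of the span words[i:j]
def pvF (ws : List (List Char)) (i j : Nat) : List Char := ((ws.drop i).take (j - i)).flatten

-- the unique end index j ≥ j₀ (if any) with words[i:j] concatenating to elem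
def pvFindEnd (ws : List (List Char)) (elem : List Char) (i j₀ : Nat) : Option Nat :=
  (List.range' j₀ (ws.length + 1 - j₀)).find? (fun j => pvF ws i j == elem)

lemma pvJoin_nil_eq_flatten (l : List (List Char)) : PySem.Chars.join [] l = l.flatten := by
  induction l with
  | nil => simp [PySem.Chars.join_nil]
  | cons a t ih =>
    cases t with
    | nil => simp [PySem.Chars.join_singleton]
    | cons b r =>
      rw [PySem.Chars.join_cons_cons]
      simp [ih]

lemma pvSplitGo_ne_nil (s : List Char) : ∀ (cur : List Char) (acc : List (List Char)),
    (∀ w ∈ acc, w ≠ []) → ∀ w ∈ PySem.Chars.split₀.go s cur acc, w ≠ [] := by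
  induction s with
  | nil =>
    intro cur acc hacc w hw
    by_cases hc : cur.isEmpty
    · simp only [PySem.Chars.split₀.go, hc, if_pos] at hw
      simp at hw
      exact hacc w hw
    · simp only [PySem.Chars.split₀.go, hc] at hw
      simp at hw
      rcases hw with h | h
      · exact hacc w h
      · subst h
        simp only [ne_eq, List.reverse_eq_nil_iff]
        intro h0
        rw [h0] at hc
        simp at hc
  | cons c rest ih =>
    intro cur acc hacc w hw
    simp only [PySem.Chars.split₀.go] at hw
    split_ifs at hw with h1 h2
    · exact ih [] acc hacc w hw
    · refine ih [] (cur.reverse :: acc) ?_ w hw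
      intro w' hw'
      rcases List.mem_cons.mp hw' with h | h
      · subst h
        simp only [ne_eq, List.reverse_eq_nil_iff]
        intro h0
        rw [h0] at h2
        simp at h2
      · exact hacc w' h
    · exact ih (c :: cur) acc hacc w hw

lemma pvSplit₀_ne_nil (cs : List Char) : ∀ w ∈ PySem.Chars.split₀ cs, w ≠ [] := by
  have h := pvSplitGo_ne_nil cs [] [] (by simp)
  simpa [PySem.Chars.split₀] using h

lemma pvF_self (ws : List (List Char)) (i : Nat) : pvF ws i i = [] := by
  simp [pvF]

lemma pvF_succ (ws : List (List Char)) {i j : Nat} (hij : i ≤ j) (hj : j < ws.length) :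
    pvF ws i (j + 1) = pvF ws i j ++ ws[j] := by
  have h1 : j + 1 - i = (j - i) + 1 := by omega
  have h2 : (ws.drop i)[j - i]? = some ws[j] := by
    rw [List.getElem?_drop]
    have h3 : i + (j - i) = j := by omega
    rw [h3, List.getElem?_eq_getElem hj]
  simp [pvF, h1, List.take_succ, h2]

lemma pvF_prefix (ws : List (List Char)) {i j k : Nat} (hij : i ≤ j) (hjk : j ≤ k)
    (hk : k ≤ ws.length) : pvF ws i j <+: pvF ws i k := by
  induction k, hjk using Nat.le_induction with
  | base => exact List.prefix_refl _
  | succ k hk' ih =>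
    have h1 : pvF ws i (k + 1) = pvF ws i k ++ ws[k] := pvF_succ ws (by omega) (by omega)
    rw [h1]
    exact (ih (by omega)).trans (List.prefix_append _ _)

lemma pvF_len_lt (ws : List (List Char)) (hw : ∀ w ∈ ws, w ≠ []) {i j k : Nat}
    (hij : i ≤ j) (hjk : j < k) (hk : k ≤ ws.length) :
    (pvF ws i j).length < (pvF ws i k).length := by
  induction k, hjk using Nat.le_induction with
  | base =>
    rw [pvF_succ ws hij (by omega)]
    have h1 : ws[j] ≠ [] := hw _ (List.getElem_mem _)
    have h2 : 0 < ws[j].length := List.length_pos_iff.mpr h1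
    simp only [List.length_append]
    omega
  | succ k hk' ih =>
    have h1 : pvF ws i (k + 1) = pvF ws i k ++ ws[k] := pvF_succ ws (by omega) (by omega)
    have h2 := ih (by omega)
    rw [h1]
    simp only [List.length_append]
    omega

-- A's j-loop computes: mark at the unique matching end, if any
lemma pvLoopJA_char (ws : List (List Char)) (hw : ∀ w ∈ ws, w ≠ []) (elem : List Char)
    (lt : String) (i : Nat) :
    ∀ (fuel j₀ : Nat) (bios : List (List Char × String)),
      ws.length + 1 - j₀ ≤ fuel → i < j₀ →
      pvLoopJA ws elem lt i j₀ bios =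
        match pvFindEnd ws elem i j₀ with
        | some j => pvMarkA bios i j lt
        | none => bios := by
  intro fuel
  induction fuel with
  | zero =>
    intro j₀ bios hf hij
    have hj : ¬ j₀ ≤ ws.length := by omega
    rw [pvLoopJA, dif_neg hj]
    have h0 : ws.length + 1 - j₀ = 0 := by omega
    simp [pvFindEnd, h0]
  | succ fuel ih =>
    intro j₀ bios hf hij
    by_cases hj : j₀ ≤ ws.length
    · rw [pvLoopJA, dif_pos hj]
      simp only [pvJoin_nil_eq_flatten]
      rw [show ((ws.drop i).take (j₀ - i)).flatten = pvF ws i j₀ from rfl]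
      have hrange : List.range' j₀ (ws.length + 1 - j₀) =
          j₀ :: List.range' (j₀ + 1) (ws.length - j₀) := by
        rw [show ws.length + 1 - j₀ = (ws.length - j₀) + 1 from by omega, List.range'_succ]
      by_cases hse : pvF ws i j₀ = elem
      · have hin : PySem.Chars.isIn (pvF ws i j₀) elem = true := by
          rw [PySem.Chars.isIn_iff_infix, hse]
        rw [if_pos hse, if_pos hin]
        rw [ih (j₀ + 1) (pvMarkA bios i j₀ lt) (by omega) (by omega)]
        have hnone : pvFindEnd ws elem i (j₀ + 1) = none := by
          unfold pvFindEnd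
          rw [List.find?_eq_none]
          intro x hx
          simp only [List.mem_range'] at hx
          obtain ⟨m, hm, rfl⟩ := hx
          simp only [beq_iff_eq]
          intro heq
          have hlen := pvF_len_lt ws hw (i := i) (j := j₀) (k := j₀ + 1 + 1 * m)
            (by omega) (by omega) (by omega)
          rw [hse, heq] at hlen
          omega
        rw [hnone]
        unfold pvFindEnd
        rw [hrange, List.find?_cons_of_pos (by simp [hse])]
      · by_cases hin : PySem.Chars.isIn (pvF ws i j₀) elem = true
        · rw [if_neg hse, if_pos hin]
          rw [ih (j₀ + 1) bios (by omega) (by omega)]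
          have heq2 : pvFindEnd ws elem i j₀ = pvFindEnd ws elem i (j₀ + 1) := by
            unfold pvFindEnd
            rw [hrange, List.find?_cons_of_neg (by simp [hse]),
              show ws.length + 1 - (j₀ + 1) = ws.length - j₀ from by omega]
          rw [heq2]
        · rw [if_neg hse, if_neg hin]
          have hnone : pvFindEnd ws elem i j₀ = none := by
            unfold pvFindEnd
            rw [List.find?_eq_none]
            intro x hx
            simp only [List.mem_range'] at hx
            obtain ⟨m, hm, rfl⟩ := hx
            simp only [beq_iff_eq]
            intro heq
            rcases Nat.eq_zero_or_pos m with rfl | hm0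
            · exact hse (by simpa using heq)
            · have hpre : pvF ws i j₀ <+: pvF ws i (j₀ + 1 * m) :=
                pvF_prefix ws (by omega) (by omega) (by omega)
              rw [heq] at hpre
              exact hin (by rw [PySem.Chars.isIn_iff_infix]; exact hpre.isInfix)
          rw [hnone]
    · rw [pvLoopJA, dif_neg hj]
      have h0 : ws.length + 1 - j₀ = 0 := by omega
      simp [pvFindEnd, h0]

lemma pvLoopIA_eq_foldl (ws : List (List Char)) (elem : List Char) (lt : String) :
    ∀ (fuel i : Nat) (bios : List (List Char × String)), ws.length - i ≤ fuel →
    pvLoopIA ws elem lt i bios =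
      (List.range' i (ws.length - i)).foldl
        (fun b i' => pvLoopJA ws elem lt i' (i' + 1) b) bios := by
  intro fuel
  induction fuel with
  | zero =>
    intro i bios hf
    have hi : ¬ i < ws.length := by omega
    rw [pvLoopIA, dif_neg hi]
    have h0 : ws.length - i = 0 := by omega
    simp [h0]
  | succ fuel ih =>
    intro i bios hf
    by_cases hi : i < ws.length
    · rw [pvLoopIA, dif_pos hi]
      rw [show ws.length - i = (ws.length - (i + 1)) + 1 from by omega, List.range'_succ,
        List.foldl_cons]
      exact ih (i + 1) _ (by omega)
    · rw [pvLoopIA, dif_neg hi]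
      have h0 : ws.length - i = 0 := by omega
      simp [h0]

-- the two marking loops write the same list for i < j
lemma pvMarkA_eq_markB (bios : List (List Char × String)) {i j : Nat} (hij : i < j)
    (lt : String) :
    pvMarkA bios i j lt =
      (List.range' (i + 1) (j - (i + 1))).foldl
        (fun b k => pvSetTag b k ("I-" ++ lt)) (pvSetTag bios i ("B-" ++ lt)) := by
  unfold pvMarkA
  rw [show j - i = (j - (i + 1)) + 1 from by omega, List.range'_succ, List.foldl_cons]
  have h0 : (bios.modify i fun p => (p.1, if i = i then "B-" ++ lt else "I-" ++ lt)) =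
      pvSetTag bios i ("B-" ++ lt) := by simp [pvSetTag]
  rw [h0]
  apply PySem.List.foldl_congr_mem
  intro acc k hk
  have hki : k ≠ i := by
    simp only [List.mem_range'] at hk
    omega
  simp [pvSetTag, hki]

lemma pvWalk_spec (ws : List (List Char)) (need i : Nat) :
    ∀ (fuel j : Nat), ws.length - j ≤ fuel → i ≤ j → j ≤ ws.length →
    ∃ j', pvWalk ws need j (pvF ws i j).length = (j', (pvF ws i j').length) ∧
      j ≤ j' ∧ j' ≤ ws.length ∧
      (∀ k, j ≤ k → k < j' → (pvF ws i k).length < need) ∧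
      (j' < ws.length → need ≤ (pvF ws i j').length) := by
  intro fuel
  induction fuel with
  | zero =>
    intro j hf hij hj
    have hje : j = ws.length := by omega
    have hcond : ¬ (j < ws.length ∧ (pvF ws i j).length < need) := by omega
    rw [pvWalk, dif_neg hcond]
    exact ⟨j, rfl, le_refl _, hj, fun k h1 h2 => by omega, fun h => by omega⟩
  | succ fuel ih =>
    intro j hf hij hj
    by_cases hcond : j < ws.length ∧ (pvF ws i j).length < need
    · rw [pvWalk, dif_pos hcond]
      have hstep : (pvF ws i j).length + (ws.getD j []).length = (pvF ws i (j + 1)).length := by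
        rw [List.getD_eq_getElem ws [] hcond.1, pvF_succ ws hij hcond.1]
        simp
      rw [hstep]
      obtain ⟨j', hwk, h1, h2, h3, h4⟩ := ih (j + 1) (by omega) (by omega) (by omega)
      refine ⟨j', hwk, by omega, h2, ?_, h4⟩
      intro k hk1 hk2
      rcases Nat.eq_or_lt_of_le hk1 with rfl | hlt
      · exact hcond.2
      · exact h3 k hlt hk2
    · rw [pvWalk, dif_neg hcond]
      refine ⟨j, rfl, le_refl _, hj, fun k h1 h2 => by omega, fun h => ?_⟩
      rcases Nat.lt_or_ge (pvF ws i j).length need with hlt | hge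
      · exact absurd ⟨h, hlt⟩ hcond
      · exact hge

-- B's per-start step computes the same mark as A's characterization
lemma pvStepB_char (ws : List (List Char)) (hw : ∀ w ∈ ws, w ≠ []) (elem : List Char)
    (hne : elem ≠ []) (tag : String) {i : Nat} (hi : i < ws.length)
    (bios : List (List Char × String)) :
    pvStepB ws elem tag bios i =
      match pvFindEnd ws elem i (i + 1) with
      | some j => pvMarkA bios i j tag
      | none => bios := by
  have hneed : 0 < elem.length := List.length_pos_iff.mpr hne
  obtain ⟨j', hwk, hij', hj'n, hlt, hstop⟩ :=
    pvWalk_spec ws elem.length i ws.length i (by omega) (le_refl i) (le_of_lt hi)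
  have h0 : (pvF ws i i).length = 0 := by rw [pvF_self]; rfl
  rw [h0] at hwk
  have hij2 : i < j' := by
    rcases Nat.eq_or_lt_of_le hij' with rfl | h
    · have := hstop hi
      rw [h0] at this
      omega
    · exact h
  have hbody : pvStepB ws elem tag bios i =
      (if (pvWalk ws elem.length i 0).2 = elem.length ∧
          PySem.Chars.join [] ((ws.drop i).take ((pvWalk ws elem.length i 0).1 - i)) = elem then
        (List.range' (i + 1) ((pvWalk ws elem.length i 0).1 - (i + 1))).foldl
          (fun b k => pvSetTag b k ("I-" ++ tag)) (pvSetTag bios i ("B-" ++ tag))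
      else bios) := rfl
  rw [hbody, hwk]
  simp only [pvJoin_nil_eq_flatten]
  rw [show ((ws.drop i).take (j' - i)).flatten = pvF ws i j' from rfl]
  by_cases hc : pvF ws i j' = elem
  · have hlen : (pvF ws i j').length = elem.length := by rw [hc]
    rw [if_pos ⟨hlen, hc⟩]
    have hfind : pvFindEnd ws elem i (i + 1) = some j' := by
      unfold pvFindEnd
      have e1 : (i + 1) + 1 * (j' - (i + 1)) = j' := by omega
      have h3 := List.range'_append (s := i + 1) (m := j' - (i + 1))
        (n := ws.length + 1 - j') (step := 1)
      rw [e1, show (j' - (i + 1)) + (ws.length + 1 - j') = ws.length + 1 - (i + 1) from by omega]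
        at h3
      rw [← h3, List.find?_append]
      have hfst : List.find? (fun j => pvF ws i j == elem)
          (List.range' (i + 1) (j' - (i + 1))) = none := by
        rw [List.find?_eq_none]
        intro x hx
        simp only [List.mem_range'] at hx
        obtain ⟨m, hm, rfl⟩ := hx
        simp only [beq_iff_eq]
        intro heq
        have := hlt (i + 1 + 1 * m) (by omega) (by omega)
        rw [heq] at this
        omega
      rw [hfst]
      rw [show ws.length + 1 - j' = (ws.length - j') + 1 from by omega, List.range'_succ,
        List.find?_cons_of_pos (by simp [hc])]
      rfl
    rw [hfind]
    exact (pvMarkA_eq_markB bios hij2 tag).symm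
  · have hcond : ¬ ((pvF ws i j').length = elem.length ∧ pvF ws i j' = elem) :=
      fun h => hc h.2
    rw [if_neg hcond]
    have hfind : pvFindEnd ws elem i (i + 1) = none := by
      unfold pvFindEnd
      rw [List.find?_eq_none]
      intro x hx
      simp only [List.mem_range'] at hx
      obtain ⟨m, hm, rfl⟩ := hx
      simp only [beq_iff_eq]
      intro heq
      have hxlen : (pvF ws i (i + 1 + 1 * m)).length = elem.length := by rw [heq]
      rcases lt_trichotomy (i + 1 + 1 * m) j' with h1 | h1 | h1
      · have := hlt (i + 1 + 1 * m) (by omega) h1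
        omega
      · exact hc (h1 ▸ heq)
      · have hs := hstop (by omega)
        have hl2 := pvF_len_lt ws hw (i := i) (j := j') (k := i + 1 + 1 * m)
          (le_of_lt hij2) h1 (by omega)
        omega
    rw [hfind]

lemma pvFindEnd_nil (ws : List (List Char)) (hw : ∀ w ∈ ws, w ≠ []) {i : Nat}
    (hi : i < ws.length) : pvFindEnd ws [] i (i + 1) = none := by
  unfold pvFindEnd
  rw [List.find?_eq_none]
  intro x hx
  simp only [List.mem_range'] at hx
  obtain ⟨m, hm, rfl⟩ := hx
  simp only [beq_iff_eq]
  intro heq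
  have := pvF_len_lt ws hw (i := i) (j := i) (k := i + 1 + 1 * m)
    (le_refl i) (by omega) (by omega)
  rw [heq] at this
  simp [pvF_self] at this

lemma pvFoldl_id {α β : Type} (l : List α) (b : β) :
    l.foldl (fun acc _ => acc) b = b := by
  induction l generalizing b with
  | nil => rfl
  | cons x t ih => exact ih b

-- per-entity equality of the two scans
lemma pvPerElem (ws : List (List Char)) (hw : ∀ w ∈ ws, w ≠ []) (elem : List Char)
    (lt : String) (bios : List (List Char × String)) :
    pvLoopIA ws elem lt 0 bios =
      (if elem = [] then bios
       else (List.range ws.length).foldl (pvStepB ws elem lt) bios) := by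
  rw [pvLoopIA_eq_foldl ws elem lt ws.length 0 bios (by omega)]
  by_cases he : elem = []
  · subst he
    rw [if_pos rfl]
    rw [PySem.List.foldl_congr_mem (g := fun acc _ => acc)]
    · exact pvFoldl_id _ _
    · intro acc i' hi'
      have hi'n : i' < ws.length := by
        simp only [List.mem_range'] at hi'
        omega
      rw [pvLoopJA_char ws hw [] lt i' (ws.length + 1) (i' + 1) acc (by omega)
        (Nat.lt_succ_self i'), pvFindEnd_nil ws hw hi'n]
  · rw [if_neg he]
    rw [show List.range' 0 (ws.length - 0) = List.range ws.length from by
      rw [List.range_eq_range', Nat.sub_zero]]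
    apply PySem.List.foldl_congr_mem
    intro acc i' hi'
    have hi'n : i' < ws.length := List.mem_range.mp hi'
    rw [pvLoopJA_char ws hw elem lt i' (ws.length + 1) (i' + 1) acc (by omega)
      (Nat.lt_succ_self i'), pvStepB_char ws hw elem he lt hi'n acc]

-- ===== VERDICT (by name: the statement is the Claim_ definition above) =====
theorem trans_bio_spec : Claim_equal_trans_bio := by
  intro data _hdom _hpre
  unfold Spec_trans_bio trans_bio trans_bio_alt
  dsimp only
  have hw := pvSplit₀_ne_nil (PySem.List.pyGetD data 0 "").toList
  congr 1
  apply PySem.List.foldl_congr_mem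
  intro b p _hp
  by_cases h2 : p.1 < 2
  · simp only [if_pos h2]
    exact pvPerElem _ hw p.2 "TRIG" b
  · simp only [if_neg h2]
    exact pvPerElem _ hw p.2 "TERM" b
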